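-- pv_equiv track=rewrite | github.com/Metalcape/zcash-flyclient | flyclient.py | remove_parents
-- ===== SOURCE A (Python) =====
-- def remove_parents(nodes_with_height: list[tuple]) -> list[tuple]:
--     if nodes_with_height is not None and len(nodes_with_height) > 0:
--         for i, h in nodes_with_height:
--             if h == 0:
--                 continue
--             left_child = (i - 2**h, h - 1)
--             right_child = (i - 1, h - 1)
--             if left_child in nodes_with_height and right_child in nodes_with_height:
--                 nodes_with_height.remove((i, h))
--                 return remove_parents(nodes_with_height)
--     return nodes_with_height
-- ===== SOURCE B (Python) =====
-- def remove_parents(nodes_with_height: list[tuple]) -> list[tuple]: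
--     if nodes_with_height is None:
--         return nodes_with_height
--     counts = {}
--     for node in nodes_with_height:
--         counts[node] = counts.get(node, 0) + 1
--     kept = []
--     for i, h in nodes_with_height:
--         if h > 0 and counts.get((i - 2**h, h - 1), 0) > 0 and counts.get((i - 1, h - 1), 0) > 0:
--             counts[(i, h)] -= 1
--         else:
--             kept.append((i, h))
--     return kept
-- ===== Notes on version B (the rewrite author's own statement) =====
-- stated objective: faster
-- what changed: Replaces A's remove-first-qualifying-node-then-restart recursion (each round rescans the list with O(n) list membership tests) by a single forward pass that keeps a dict of node counts, dropping each node whose two children are still present; qualification only decreases as nodes are removed, so no restart is needed.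
import Mathlib
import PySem

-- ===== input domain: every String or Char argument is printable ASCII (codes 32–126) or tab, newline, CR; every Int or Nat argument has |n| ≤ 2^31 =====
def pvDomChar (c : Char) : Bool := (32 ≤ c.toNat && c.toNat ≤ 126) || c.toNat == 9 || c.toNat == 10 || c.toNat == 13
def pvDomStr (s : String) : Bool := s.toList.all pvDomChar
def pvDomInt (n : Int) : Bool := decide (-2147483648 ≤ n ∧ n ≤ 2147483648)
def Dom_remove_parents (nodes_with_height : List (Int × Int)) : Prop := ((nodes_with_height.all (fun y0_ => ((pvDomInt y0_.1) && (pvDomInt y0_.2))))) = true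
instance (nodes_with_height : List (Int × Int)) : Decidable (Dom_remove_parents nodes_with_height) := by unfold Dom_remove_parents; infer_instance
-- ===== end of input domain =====

-- B replaces A's remove-and-restart recursion (repeated list scans with list membership tests)
-- by a single forward pass over the list with a count dictionary.
-- NOTE: Python A mutates its argument in place (list.remove); B builds a fresh list.
-- The equivalence proved here is about the RETURN value only.

-- ===== PORT A =====
-- A scans the current list for the first node (i, h) with h ≠ 0 whose two children are both
-- in the current list; if found, it removes that node (first occurrence) and restarts.
-- For h < 0 Python computes 2**h as a non-integral float, so the child tuples can never be
-- members of a list of int pairs: both membership tests are False there (exact on Dom).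
def findQual (l : List (Int × Int)) : List (Int × Int) → Option (Int × Int)
  | [] => none
  | (i, h) :: rest =>
    if h = 0 then findQual l rest
    else if h < 0 then findQual l rest      -- children are non-integral floats: never members
    else if (i - 2 ^ h.toNat, h - 1) ∈ l ∧ (i - 1, h - 1) ∈ l then some (i, h)
    else findQual l rest

theorem findQual_mem (l : List (Int × Int)) :
    ∀ xs p, findQual l xs = some p → p ∈ xs := by
  intro xs
  induction xs with
  | nil => intro p h; simp [findQual] at h
  | cons x rest ih =>
    intro p h
    obtain ⟨i, hh⟩ := x
    simp only [findQual] at h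
    split_ifs at h with h1 h2 h3
    · exact List.mem_cons_of_mem _ (ih p h)
    · exact List.mem_cons_of_mem _ (ih p h)
    · cases h; exact List.mem_cons_self
    · exact List.mem_cons_of_mem _ (ih p h)

def remove_parents (nodes_with_height : List (Int × Int)) : List (Int × Int) :=
  match hf : findQual nodes_with_height nodes_with_height with
  | none => nodes_with_height
  | some p => remove_parents (nodes_with_height.erase p)   -- list.remove = erase first occurrence; p was just found in the list
termination_by nodes_with_height.length
decreasing_by
  exact List.length_erase_of_mem (findQual_mem _ _ _ hf) ▸
    Nat.sub_lt (List.length_pos_of_mem (findQual_mem _ _ _ hf)) Nat.one_pos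

-- ===== PORT B =====
-- counts[node] = counts.get(node, 0) + 1 over the list, then one pass keeping the
-- non-qualifying nodes and decrementing the count of each dropped node.
def altGo (cnt : PySem.Dict (Int × Int) Int) : List (Int × Int) → List (Int × Int)
  | [] => []
  | (i, h) :: rest =>
    if 0 < h ∧ 0 < cnt.getD (i - 2 ^ h.toNat, h - 1) 0 ∧ 0 < cnt.getD (i - 1, h - 1) 0 then
      altGo (cnt.modify (i, h) 0 (· - 1)) rest
    else
      (i, h) :: altGo cnt rest

def remove_parents_alt (nodes_with_height : List (Int × Int)) : List (Int × Int) :=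
  altGo (nodes_with_height.foldl (fun d x => d.modify x 0 (· + 1)) PySem.Dict.empty)
    nodes_with_height

-- ===== PRECONDITION & SPEC =====
def Spec_remove_parents (nodes_with_height : List (Int × Int)) (out : List (Int × Int)) : Prop := out = remove_parents_alt nodes_with_height
instance (nodes_with_height : List (Int × Int)) (out : List (Int × Int)) : Decidable (Spec_remove_parents nodes_with_height out) := by unfold Spec_remove_parents; infer_instance

-- ===== CLAIM (what is proved, stated in full; the proofs are below) =====
def Claim_equal_remove_parents : Prop := ∀ (nodes_with_height : List (Int × Int)), Dom_remove_parents nodes_with_height → Spec_remove_parents nodes_with_height (remove_parents nodes_with_height)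

-- ===== LEMMAS AND PROOFS =====

-- a node qualifies for removal wrt the current list cur
def qualb (cur : List (Int × Int)) (x : Int × Int) : Bool :=
  decide (0 < x.2) && decide ((x.1 - 2 ^ x.2.toNat, x.2 - 1) ∈ cur)
    && decide ((x.1 - 1, x.2 - 1) ∈ cur)

-- reference: forward pass over todo, erasing each dropped node from the current list cur
def refPass (cur : List (Int × Int)) : List (Int × Int) → List (Int × Int)
  | [] => []
  | x :: todo => if qualb cur x then refPass (cur.erase x) todo else x :: refPass cur todo

theorem qualb_nonpos (cur : List (Int × Int)) (x : Int × Int) (h : x.2 ≤ 0) :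
    qualb cur x = false := by
  simp only [qualb, Bool.and_eq_false_iff, decide_eq_false_iff_not]
  exact Or.inl (Or.inl (by omega))

theorem qualb_mono (cur : List (Int × Int)) (y x : Int × Int)
    (h : qualb cur x = false) : qualb (cur.erase y) x = false := by
  simp only [qualb, Bool.and_eq_false_iff, decide_eq_false_iff_not] at h ⊢
  rcases h with (h | h) | h
  · exact Or.inl (Or.inl h)
  · exact Or.inl (Or.inr fun hm => h (List.mem_of_mem_erase hm))
  · exact Or.inr fun hm => h (List.mem_of_mem_erase hm)

theorem findQual_none_qualb (l : List (Int × Int)) :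
    ∀ xs, findQual l xs = none → ∀ x ∈ xs, qualb l x = false := by
  intro xs
  induction xs with
  | nil => intro _ x hx; simp at hx
  | cons y rest ih =>
    intro h x hx
    obtain ⟨i, hh⟩ := y
    simp only [findQual] at h
    rcases List.mem_cons.mp hx with rfl | hx'
    · split_ifs at h with h1 h2 h3
      · exact qualb_nonpos _ _ (by omega)
      · exact qualb_nonpos _ _ (by omega)
      · push_neg at h3
        simp only [qualb, Bool.and_eq_false_iff, decide_eq_false_iff_not]
        by_cases hm : ((i : Int) - 2 ^ (hh : Int).toNat, hh - 1) ∈ l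
        · exact Or.inr (h3 hm)
        · exact Or.inl (Or.inr hm)
    · split_ifs at h with h1 h2 h3
      · exact ih h _ hx'
      · exact ih h _ hx'
      · exact ih h _ hx'

theorem findQual_some_split (l : List (Int × Int)) :
    ∀ xs p, findQual l xs = some p →
      ∃ pre suf, xs = pre ++ p :: suf ∧ (∀ x ∈ pre, qualb l x = false) ∧ qualb l p = true := by
  intro xs
  induction xs with
  | nil => intro p h; simp [findQual] at h
  | cons y rest ih =>
    intro p h
    obtain ⟨i, hh⟩ := y
    simp only [findQual] at h
    split_ifs at h with h1 h2 h3
    · obtain ⟨pre, suf, hsplit, hpre, hp⟩ := ih p h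
      refine ⟨(i, hh) :: pre, suf, by simp [hsplit], ?_, hp⟩
      intro x hx
      rcases List.mem_cons.mp hx with rfl | hx'
      · exact qualb_nonpos _ _ (by omega)
      · exact hpre _ hx'
    · obtain ⟨pre, suf, hsplit, hpre, hp⟩ := ih p h
      refine ⟨(i, hh) :: pre, suf, by simp [hsplit], ?_, hp⟩
      intro x hx
      rcases List.mem_cons.mp hx with rfl | hx'
      · exact qualb_nonpos _ _ (by omega)
      · exact hpre _ hx'
    · cases h
      refine ⟨[], rest, by simp, by simp, ?_⟩
      simp only [qualb, Bool.and_eq_true, decide_eq_true_eq]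
      exact ⟨⟨by omega, h3.1⟩, h3.2⟩
    · obtain ⟨pre, suf, hsplit, hpre, hp⟩ := ih p h
      push_neg at h3
      refine ⟨(i, hh) :: pre, suf, by simp [hsplit], ?_, hp⟩
      intro x hx
      rcases List.mem_cons.mp hx with rfl | hx'
      · simp only [qualb, Bool.and_eq_false_iff, decide_eq_false_iff_not]
        by_cases hm : ((i : Int) - 2 ^ (hh : Int).toNat, hh - 1) ∈ l
        · exact Or.inr (h3 hm)
        · exact Or.inl (Or.inr hm)
      · exact hpre _ hx'

theorem refPass_prefix (cur pre rest : List (Int × Int))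
    (h : ∀ x ∈ pre, qualb cur x = false) :
    refPass cur (pre ++ rest) = pre ++ refPass cur rest := by
  induction pre with
  | nil => simp
  | cons y pre ih =>
    simp only [List.cons_append, refPass]
    rw [if_neg (by simp [h y List.mem_cons_self]),
      ih fun x hx => h x (List.mem_cons_of_mem _ hx)]

theorem refPass_all_false (cur : List (Int × Int)) :
    ∀ xs, (∀ x ∈ xs, qualb cur x = false) → refPass cur xs = xs := by
  intro xs
  induction xs with
  | nil => intro _; simp [refPass]
  | cons y rest ih =>
    intro h
    simp only [refPass]
    rw [if_neg (by simp [h y List.mem_cons_self]), ih fun x hx => h x (List.mem_cons_of_mem _ hx)]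

theorem remove_parents_eq_refPass (l : List (Int × Int)) :
    remove_parents l = refPass l l := by
  generalize hn : l.length = n
  induction n using Nat.strong_induction_on generalizing l with
  | _ n ih =>
    rw [remove_parents]
    cases hf : findQual l l with
    | none =>
      exact (refPass_all_false l l (findQual_none_qualb l l hf)).symm
    | some p =>
      obtain ⟨pre, suf, hsplit, hpre, hp⟩ := findQual_some_split l l p hf
      subst hsplit
      have hpnotpre : p ∉ pre := fun hmem => by
        have := hpre p hmem; rw [hp] at this; exact absurd this (by simp)
      have herase : (pre ++ p :: suf).erase p = pre ++ suf := by
        rw [List.erase_append_right _ hpnotpre, List.erase_cons_head]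
      have hlen : ((pre ++ p :: suf).erase p).length < n := by
        rw [herase]; simp at hn ⊢; omega
      have hIH := ih _ hlen ((pre ++ p :: suf).erase p) rfl
      have hL : refPass (pre ++ p :: suf) (pre ++ p :: suf)
          = pre ++ refPass ((pre ++ p :: suf).erase p) suf := by
        rw [refPass_prefix _ _ _ hpre]
        simp only [refPass]
        rw [if_pos hp]
      have hR : refPass (pre ++ suf) (pre ++ suf) = pre ++ refPass (pre ++ suf) suf :=
        refPass_prefix _ _ _ fun x hx => herase ▸ qualb_mono _ p x (hpre x hx)
      rw [herase] at hIH hL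
      show remove_parents ((pre ++ p :: suf).erase p) = _
      rw [herase, hIH, hR, hL]

-- counts built by B's first loop are Python's Counter
theorem counts_eq_counter (l : List (Int × Int)) :
    l.foldl (fun d x => d.modify x 0 (· + 1)) PySem.Dict.empty = PySem.Dict.counter l :=
  (PySem.Dict.counter_eq_foldl l).symm

theorem altGo_eq_refPass :
    ∀ (todo : List (Int × Int)) (cnt : PySem.Dict (Int × Int) Int) (cur : List (Int × Int)),
      (∀ v, cnt.getD v 0 = (cur.count v : Int)) →
      (∀ v, todo.count v ≤ cur.count v) →
      altGo cnt todo = refPass cur todo := by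
  intro todo
  induction todo with
  | nil => intro cnt cur _ _; simp [altGo, refPass]
  | cons x rest ih =>
    intro cnt cur hcnt hsub
    obtain ⟨i, h⟩ := x
    have hmemL : ∀ v : Int × Int, (0 < cnt.getD v 0) ↔ v ∈ cur := by
      intro v
      rw [hcnt v]
      constructor
      · intro hv
        exact List.count_pos_iff.mp (by exact_mod_cast hv)
      · intro hv; exact_mod_cast List.count_pos_iff.mpr hv
    have hcond : (0 < h ∧ 0 < cnt.getD (i - 2 ^ h.toNat, h - 1) 0 ∧ 0 < cnt.getD (i - 1, h - 1) 0)
        ↔ qualb cur (i, h) = true := by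
      simp only [qualb, Bool.and_eq_true, decide_eq_true_eq, hmemL]
      tauto
    by_cases hq : qualb cur (i, h) = true
    · have hx : (i, h) ∈ cur := by
        have h1 := hsub (i, h)
        simp only [List.count_cons_self] at h1
        exact List.count_pos_iff.mp (by omega)
      simp only [altGo, refPass]
      rw [if_pos (hcond.mpr hq), if_pos hq]
      apply ih
      · intro v
        rw [PySem.Dict.getD_modify]
        by_cases hv : v = (i, h)
        · subst hv
          rw [if_pos rfl, hcnt, List.count_erase_self]
          have h1 : 1 ≤ cur.count (i, h) := List.count_pos_iff.mpr hx
          omega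
        · rw [if_neg hv, hcnt, List.count_erase_of_ne hv]
      · intro v
        by_cases hv : v = (i, h)
        · subst hv
          have h1 := hsub (i, h)
          simp only [List.count_cons_self] at h1
          rw [List.count_erase_self]; omega
        · have h1 := hsub v
          rw [List.count_cons_of_ne (fun hc => hv hc.symm)] at h1
          rw [List.count_erase_of_ne hv]; omega
    · simp only [altGo, refPass]
      rw [if_neg (fun hc => hq (hcond.mp hc)), if_neg hq]
      congr 1
      apply ih _ _ hcnt
      intro v
      have h1 := hsub v
      by_cases hv : v = (i, h)
      · subst hv; simp only [List.count_cons_self] at h1; omega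
      · rw [List.count_cons_of_ne (fun hc => hv hc.symm)] at h1; omega

theorem alt_eq_refPass (l : List (Int × Int)) : remove_parents_alt l = refPass l l := by
  unfold remove_parents_alt
  rw [counts_eq_counter]
  exact altGo_eq_refPass l _ l (fun v => PySem.Dict.getD_counter l v) (fun v => le_refl _)

-- ===== VERDICT (by name: the statement is the Claim_ definition above) =====
theorem remove_parents_spec : Claim_equal_remove_parents := by
  intro l _
  unfold Spec_remove_parents
  rw [remove_parents_eq_refPass, alt_eq_refPass]
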